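-- pv_equiv track=rewrite | github.com/EricCharnesky/CIS1501-Fall2021 | MidtermReview/main.py | difference_of_primes_and_non_primes_through_n
-- ===== SOURCE A (Python) =====
-- import math
--
-- def is_prime(n):
--     if n == 2:
--         return True
--     if n % 2 == 0 or n <= 1:
--         return False
--
--     sqr = int(math.sqrt(n)) + 1
--
--     for divisor in range(3, sqr, 2):
--         if n % divisor == 0:
--             return False
--     return True
--
-- def difference_of_primes_and_non_primes_through_n( number ):
--     difference = 0
--     for number in range(1, number+1):
--         if is_prime(number):
--             difference += number
--         else:
--             difference -= number
--     return difference
-- ===== SOURCE B (Python) =====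
-- def difference_of_primes_and_non_primes_through_n(number):
--     if number < 1:
--         return 0
--     sieve = [True] * (number + 1)
--     sieve[0] = False
--     sieve[1] = False
--     for i in range(2, number + 1):
--         if sieve[i]:
--             for j in range(i * i, number + 1, i):
--                 sieve[j] = False
--     total = 0
--     for k in range(1, number + 1):
--         total += k if sieve[k] else -k
--     return total
-- ===== Notes on version B (the rewrite author's own statement) =====
-- stated objective: faster
-- what changed: replaces per-number trial division (sqrt loop for every number up to n) by a single Sieve of Eratosthenes followed by one summation pass
import Mathlib
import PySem

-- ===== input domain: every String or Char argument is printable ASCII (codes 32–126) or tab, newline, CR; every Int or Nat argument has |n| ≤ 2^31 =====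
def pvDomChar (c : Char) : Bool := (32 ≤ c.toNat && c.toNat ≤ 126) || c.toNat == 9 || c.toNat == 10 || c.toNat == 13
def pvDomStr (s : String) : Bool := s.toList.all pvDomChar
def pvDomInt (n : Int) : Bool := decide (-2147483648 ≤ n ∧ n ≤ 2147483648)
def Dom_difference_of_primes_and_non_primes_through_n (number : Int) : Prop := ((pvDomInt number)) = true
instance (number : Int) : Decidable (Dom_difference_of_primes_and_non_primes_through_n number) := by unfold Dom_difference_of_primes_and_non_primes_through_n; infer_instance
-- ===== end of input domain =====

-- B replaces A's per-number trial division by one Sieve of Eratosthenes plus a single summation pass (faster, asymptotic).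


-- ===== PORT A =====
-- is_prime(n); 'int(math.sqrt(n)) + 1' is ported by hand as 'Nat.sqrt n.toNat + 1':
-- exact here, since int(math.sqrt(n)) equals the integer square root for every 0 ≤ n ≤ 2^31.
def isPrimeA (n : Int) : Bool :=
  if n = 2 then true
  else if PySem.Int.mod n 2 = 0 || n ≤ 1 then false
  else
    let sqr : Int := (Nat.sqrt n.toNat : Int) + 1
    -- for divisor in range(3, sqr, 2): if n % divisor == 0: return False / else True
    (PySem.List.pyRange 3 sqr 2).all (fun divisor => !(PySem.Int.mod n divisor = 0))

def difference_of_primes_and_non_primes_through_n (number : Int) : Int :=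
  (PySem.List.pyRange 1 (number + 1) 1).foldl
    (fun difference k => if isPrimeA k then difference + k else difference - k) 0

-- ===== PORT B =====
-- inner loop: for j in range(i*i, number+1, i): sieve[j] = False  (every j here is ≥ 0, so 'List.set j.toNat' is exact)
def markMultiplesB (stop : Int) (s : List Bool) (i : Int) : List Bool :=
  (PySem.List.pyRange (i * i) stop i).foldl (fun t j => t.set j.toNat false) s

-- sieve = [True]*(number+1); sieve[0]=sieve[1]=False; for i in range(2, number+1): if sieve[i]: mark multiples
-- (reads sieve[i] are always in range, so 'getD i.toNat false' is exact)
def sieveB (number : Int) : List Bool :=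
  (PySem.List.pyRange 2 (number + 1) 1).foldl
    (fun s i => if s.getD i.toNat false then markMultiplesB (number + 1) s i else s)
    (((List.replicate (number.toNat + 1) true).set 0 false).set 1 false)

def difference_of_primes_and_non_primes_through_n_alt (number : Int) : Int :=
  if number < 1 then 0
  else
    let sieve := sieveB number
    (PySem.List.pyRange 1 (number + 1) 1).foldl
      (fun total k => if sieve.getD k.toNat false then total + k else total - k) 0

-- ===== PRECONDITION & SPEC =====
def Spec_difference_of_primes_and_non_primes_through_n (number : Int) (out : Int) : Prop := out = difference_of_primes_and_non_primes_through_n_alt number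
instance (number : Int) (out : Int) : Decidable (Spec_difference_of_primes_and_non_primes_through_n number out) := by unfold Spec_difference_of_primes_and_non_primes_through_n; infer_instance

-- ===== CLAIM (what is proved, stated in full; the proofs are below) =====
def Claim_equal_difference_of_primes_and_non_primes_through_n : Prop := ∀ (number : Int), Dom_difference_of_primes_and_non_primes_through_n number → Spec_difference_of_primes_and_non_primes_through_n number (difference_of_primes_and_non_primes_through_n number)

-- ===== LEMMAS AND PROOFS =====

-- "k has a proper small factor below m": the composites marked after the sieve has processed i = 2 .. m-1
def Cpred (m k : ℕ) : Prop := ∃ d, 2 ≤ d ∧ d < m ∧ d * d ≤ k ∧ d ∣ k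

-- any witness of Cpred is < k+1, so the bound is irrelevant once it exceeds k
lemma Cpred_mono_high {m m' k : ℕ} (hm : k + 1 ≤ m) (hm' : k + 1 ≤ m') :
    Cpred m k ↔ Cpred m' k := by
  constructor <;> rintro ⟨d, h2, hlt, hdd, hdvd⟩ <;>
    exact ⟨d, h2, by nlinarith, hdd, hdvd⟩

-- the inner marking fold, characterised pointwise
lemma foldl_set_false (l : List Int) (hl : ∀ j ∈ l, 0 ≤ j) (s : List Bool) :
    (l.foldl (fun t j => t.set j.toNat false) s).length = s.length ∧
    ∀ k : ℕ, (l.foldl (fun t j => t.set j.toNat false) s).getD k false =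
      if (k : Int) ∈ l ∧ k < s.length then false else s.getD k false := by
  induction l generalizing s with
  | nil => simp
  | cons j tl ih =>
    have hj : 0 ≤ j := hl j (by simp)
    have ihs := ih (fun x hx => hl x (by simp [hx])) (s.set j.toNat false)
    refine ⟨by simpa using ihs.1, fun k => ?_⟩
    have hk := ihs.2 k
    simp only [List.foldl_cons] at *
    rw [hk]
    have hset : (s.set j.toNat false).getD k false =
        if (k : Int) = j ∧ k < s.length then false else s.getD k false := by
      rw [List.getD_eq_getElem?_getD, List.getD_eq_getElem?_getD, List.getElem?_set]
      by_cases h : (k : Int) = j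
      · have : j.toNat = k := by omega
        simp [this, h]
        by_cases hlen : k < s.length <;> simp [hlen]
      · have : j.toNat ≠ k := by omega
        simp [this, h]
    rw [List.length_set, hset]
    by_cases hmem : (k : Int) ∈ tl <;> by_cases heq : (k : Int) = j <;>
      by_cases hlen : k < s.length <;> simp_all
  
-- the partial sieve after the outer loop has run for i = 2 .. m-1
def partialSieve (number : Int) (m : ℕ) : List Bool :=
  (PySem.List.pyRange 2 (m : Int) 1).foldl
    (fun s i => if s.getD i.toNat false then markMultiplesB (number + 1) s i else s)
    (((List.replicate (number.toNat + 1) true).set 0 false).set 1 false)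

lemma sieve_inv (number : Int) (h1 : 1 ≤ number) :
    ∀ m : ℕ, 2 ≤ m → (m : Int) ≤ number + 1 →
      (partialSieve number m).length = number.toNat + 1 ∧
      ∀ k : ℕ, k < number.toNat + 1 →
        ((partialSieve number m).getD k false = true ↔ (2 ≤ k ∧ ¬ Cpred m k)) := by
  intro m hm
  induction m, hm using Nat.le_induction with
  | base =>
    intro _
    constructor
    · have hc : ((2:ℕ):Int) = (2:Int) := by norm_num
      simp [partialSieve, PySem.List.pyRange_one_eq_nil (le_refl (2:Int))]
    · intro k hk
      have hC : ¬ Cpred 2 k := by rintro ⟨d, h2, h3, -, -⟩; omega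
      have hc : ((2:ℕ):Int) = (2:Int) := by norm_num
      simp only [partialSieve, hc, PySem.List.pyRange_one_eq_nil (le_refl (2:Int)),
        List.foldl_nil]
      rw [List.getD_eq_getElem?_getD, List.getElem?_set, List.getElem?_set]
      rcases Nat.lt_or_ge k 2 with h2 | h2
      · interval_cases k <;> simp_all
      · have h0 : (0 : ℕ) ≠ k := by omega
        have h1' : (1 : ℕ) ≠ k := by omega
        simp [h0, h1', hk, h2, hC]
  | succ m hm ih =>
    intro hle
    have hmn : (m : Int) ≤ number + 1 := by push_cast at hle ⊢; omega
    have hmlt : m < number.toNat + 1 := by omega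
    obtain ⟨ihlen, ihval⟩ := ih hmn
    have hsplit : partialSieve number (↑(m + 1)) =
        (if (partialSieve number m).getD ((m:Int)).toNat false then
          markMultiplesB (number + 1) (partialSieve number m) (m:Int)
        else partialSieve number m) := by
      have : ((m + 1 : ℕ) : Int) = (m : Int) + 1 := by push_cast; ring
      rw [partialSieve, this, PySem.List.pyRange_one_succ_right (by exact_mod_cast hm.trans (by omega) : (2:Int) ≤ (m:Int)),
        List.foldl_append]
      rfl
    have htm : ((m:Int)).toNat = m := Int.toNat_natCast m
    -- Cpred (m+1) k unfolds into Cpred m k or the new i = m witness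
    have hCsucc : ∀ k : ℕ, Cpred (m + 1) k ↔ (Cpred m k ∨ (m * m ≤ k ∧ m ∣ k)) := by
      intro k
      constructor
      · rintro ⟨d, h2, hlt, hdd, hdvd⟩
        rcases Nat.lt_or_ge d m with h | h
        · exact Or.inl ⟨d, h2, h, hdd, hdvd⟩
        · have : d = m := by omega
          subst this; exact Or.inr ⟨hdd, hdvd⟩
      · rintro (⟨d, h2, hlt, hdd, hdvd⟩ | ⟨hdd, hdvd⟩)
        · exact ⟨d, h2, by omega, hdd, hdvd⟩
        · exact ⟨m, hm, by omega, hdd, hdvd⟩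
    rw [hsplit, htm]
    by_cases hsm : (partialSieve number m).getD m false = true
    · -- sieve[m] is true: mark all multiples j of m with m*m ≤ j ≤ number
      rw [if_pos hsm]
      have hpos : (0:Int) < (m:Int) := by exact_mod_cast Nat.lt_of_lt_of_le Nat.zero_lt_two hm
      have hnn : ∀ j ∈ PySem.List.pyRange ((m:Int) * (m:Int)) (number + 1) (m:Int), 0 ≤ j := by
        intro j hj
        have := (PySem.List.mem_pyRange_iff_of_pos hpos j).mp hj
        nlinarith [this.1]
      obtain ⟨hlen, hval⟩ := foldl_set_false _ hnn (partialSieve number m)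
      rw [markMultiplesB]
      refine ⟨by rw [hlen, ihlen], fun k hk => ?_⟩
      rw [hval k, ihlen]
      have hmemiff : ((k : Int) ∈ PySem.List.pyRange ((m:Int) * (m:Int)) (number + 1) (m:Int))
          ↔ (m * m ≤ k ∧ m ∣ k) := by
        rw [PySem.List.mem_pyRange_iff_of_pos hpos]
        have hdvd_iff : ((m:Int) ∣ (k:Int) - (m:Int) * (m:Int)) ↔ ((m:Int) ∣ (k:Int)) := by
          constructor
          · intro h
            have : (k:Int) = ((k:Int) - (m:Int) * (m:Int)) + (m:Int) * (m:Int) := by ring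
            rw [this]; exact dvd_add h (dvd_mul_right _ _)
          · intro h; exact dvd_sub h (dvd_mul_right _ _)
        rw [hdvd_iff]
        constructor
        · rintro ⟨ha, hb, hc⟩
          exact ⟨by exact_mod_cast ha, by exact_mod_cast hc⟩
        · rintro ⟨ha, hb⟩
          refine ⟨by exact_mod_cast ha, ?_, by exact_mod_cast hb⟩
          have : (k : Int) ≤ number := by omega
          omega
      simp only [hmemiff]
      by_cases hcond : m * m ≤ k ∧ m ∣ k
      · have hC : Cpred (m + 1) k := (hCsucc k).mpr (Or.inr hcond)
        simp [hcond, hk, hC]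
      · have : (¬ (m * m ≤ k ∧ m ∣ k ∧ k < number.toNat + 1)) := by tauto
        rw [if_neg (by tauto), ihval k hk, hCsucc k]
        tauto
    · -- sieve[m] is false: m already has a small factor, so marking it would add nothing
      rw [if_neg hsm]
      refine ⟨ihlen, fun k hk => ?_⟩
      have hCm : Cpred m m := by
        by_contra hC
        exact hsm ((ihval m hmlt).mpr ⟨hm, hC⟩)
      obtain ⟨e, he2, helt, hee, hedvd⟩ := hCm
      have : Cpred (m + 1) k ↔ Cpred m k := by
        rw [hCsucc k]
        constructor
        · rintro (h | ⟨hdd, hdvd⟩)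
          · exact h
          · exact ⟨e, he2, helt, by nlinarith, hedvd.trans hdvd⟩
        · exact Or.inl
      rw [ihval k hk, this]

lemma sieveB_char (number : Int) (h1 : 1 ≤ number) :
    ∀ k : ℕ, k < number.toNat + 1 →
      ((sieveB number).getD k false = true ↔ (2 ≤ k ∧ ¬ Cpred (number.toNat + 1) k)) := by
  have hcast : ((number.toNat + 1 : ℕ) : Int) = number + 1 := by
    push_cast; omega
  have hB : sieveB number = partialSieve number (number.toNat + 1) := by
    rw [sieveB, partialSieve, hcast]
  rw [hB]
  exact (sieve_inv number h1 (number.toNat + 1) (by omega) (by rw [hcast])).2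

lemma isPrimeA_char (k : ℕ) (hk : 1 ≤ k) :
    (isPrimeA (k : Int) = true) ↔ (2 ≤ k ∧ ¬ Cpred (k + 1) k) := by
  have hmod : PySem.Int.mod (k : Int) 2 = ((k % 2 : ℕ) : Int) := by
    exact_mod_cast PySem.Int.mod_natCast k 2
  by_cases hk2 : k = 2
  · subst hk2
    have : isPrimeA ((2:ℕ) : Int) = true := by norm_num [isPrimeA]
    rw [this]
    simp only [true_iff]
    refine ⟨le_refl 2, ?_⟩
    rintro ⟨d, h2, h3, hdd, -⟩
    have : 4 ≤ d * d := Nat.mul_le_mul h2 h2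
    omega
  · have hne : ((k : Int) = 2) = False := by
      simp only [eq_iff_iff, iff_false]
      exact_mod_cast hk2
    by_cases heven : k % 2 = 0
    · -- even and not 2: is_prime returns False, and d = 2 is a small factor (k ≥ 4)
      have hk4 : 4 ≤ k := by omega
      have : isPrimeA (k : Int) = false := by
        rw [isPrimeA, if_neg (by exact_mod_cast hk2), hmod, heven]
        simp
      rw [this]
      simp only [Bool.false_eq_true, false_iff, not_and, not_not]
      intro _
      exact ⟨2, le_refl 2, by omega, by omega, Nat.dvd_of_mod_eq_zero heven⟩
    · by_cases hk1 : k = 1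
      · subst hk1
        have : isPrimeA ((1:ℕ) : Int) = false := by norm_num [isPrimeA]
        rw [this]; simp
      · -- odd k ≥ 3: the trial-division loop
        have hk3 : 3 ≤ k := by omega
        have hA : isPrimeA (k : Int) =
            (PySem.List.pyRange 3 ((Nat.sqrt k : Int) + 1) 2).all
              (fun divisor => !(PySem.Int.mod (k:Int) divisor = 0)) := by
          rw [isPrimeA, if_neg (by exact_mod_cast hk2), hmod]
          have h2' : ¬ (((k % 2 : ℕ) : Int) = 0 ∨ (k : Int) ≤ 1) := by
            rintro (h | h)
            · exact heven (by exact_mod_cast h)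
            · omega
          rw [if_neg (by simpa using h2')]
          simp
        rw [hA, List.all_eq_true]
        have h2gt : (0:Int) < 2 := by norm_num
        constructor
        · intro H
          refine ⟨by omega, ?_⟩
          rintro ⟨d, hd2, -, hdd, hdvd⟩
          -- d is odd (k is odd), so d ≥ 3 and d lies in range(3, sqrt+1, 2)
          have hdodd : d % 2 = 1 := by
            rcases Nat.mod_two_eq_zero_or_one d with h | h
            · exfalso
              have : 2 ∣ k := dvd_trans (Nat.dvd_of_mod_eq_zero h) hdvd
              omega
            · exact h
          have hd3 : 3 ≤ d := by omega
          have hdsqrt : d ≤ Nat.sqrt k := Nat.le_sqrt'.mpr (by nlinarith)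
          have hmem : (d : Int) ∈ PySem.List.pyRange 3 ((Nat.sqrt k : Int) + 1) 2 := by
            rw [PySem.List.mem_pyRange_iff_of_pos h2gt]
            refine ⟨by exact_mod_cast hd3, by omega, ?_⟩
            have : (2:ℕ) ∣ (d - 3) := by omega
            have hc : ((d:Int) - 3) = ((d - 3 : ℕ) : Int) := by omega
            rw [hc]
            exact_mod_cast this
          have := H _ hmem
          simp only [Bool.not_eq_eq_eq_not, Bool.not_true, decide_eq_false_iff_not] at this
          exact this ((PySem.Int.mod_eq_zero_iff_dvd _ _).mpr (by exact_mod_cast hdvd))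
        · rintro ⟨-, hnC⟩ d hdmem
          simp only [Bool.not_eq_eq_eq_not, Bool.not_true, decide_eq_false_iff_not]
          intro hmod0
          have hdvdInt : (d : Int) ∣ (k : Int) := (PySem.Int.mod_eq_zero_iff_dvd _ _).mp hmod0
          obtain ⟨hd3, hdlt, -⟩ := (PySem.List.mem_pyRange_iff_of_pos h2gt d).mp hdmem
          have hd0 : 0 ≤ d := by omega
          have hdn : d = ((d.toNat : ℕ) : Int) := by omega
          have hd3' : 3 ≤ d.toNat := by omega
          have hdsq : d.toNat ≤ Nat.sqrt k := by
            have : (d.toNat : Int) ≤ (Nat.sqrt k : Int) := by omega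
            exact_mod_cast this
          have hdd : d.toNat * d.toNat ≤ k := by
            have := Nat.le_sqrt'.mp hdsq
            nlinarith
          have hdvdN : d.toNat ∣ k := by
            rw [hdn] at hdvdInt
            exact_mod_cast hdvdInt
          exact hnC ⟨d.toNat, by omega, by nlinarith, hdd, hdvdN⟩

-- ===== VERDICT (by name: the statement is the Claim_ definition above) =====
theorem difference_of_primes_and_non_primes_through_n_spec : Claim_equal_difference_of_primes_and_non_primes_through_n := by
  intro number _
  unfold Spec_difference_of_primes_and_non_primes_through_n
  by_cases hneg : number < 1
  · rw [difference_of_primes_and_non_primes_through_n,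
      difference_of_primes_and_non_primes_through_n_alt, if_pos hneg,
      PySem.List.pyRange_one_eq_nil (by omega), List.foldl_nil]
  · have hneg1 : 1 ≤ number := by omega
    rw [difference_of_primes_and_non_primes_through_n,
      difference_of_primes_and_non_primes_through_n_alt, if_neg (by omega)]
    apply PySem.List.foldl_congr_mem
    intro acc x hx
    obtain ⟨hx1, hx2⟩ := (PySem.List.mem_pyRange_one).mp hx
    have hxk : x = ((x.toNat : ℕ) : Int) := by omega
    set k := x.toNat with hkdef
    have hk1 : 1 ≤ k := by omega
    have hkn : k < number.toNat + 1 := by omega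
    have hiffA := isPrimeA_char k hk1
    have hiffB := sieveB_char number hneg1 k hkn
    have hbridge : Cpred (k + 1) k ↔ Cpred (number.toNat + 1) k :=
      Cpred_mono_high (le_refl _) (by omega)
    have : isPrimeA x = (sieveB number).getD k false := by
      rw [hxk, Bool.eq_iff_iff, hiffA, hiffB, hbridge]
    rw [this]
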